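-- pv_equiv track=rewrite | github.com/Vcky4/maigie | apps/backend/src/services/chat_tool_arg_enrichment.py | _lookup_created_id
-- ===== SOURCE A (Python) =====
-- from typing import Any
--
-- _ID_ALIASES: tuple[tuple[str, str], ...] = (
--     ("course_id", "courseId"),
--     ("goal_id", "goalId"),
--     ("topic_id", "topicId"),
--     ("note_id", "noteId"),
--     ("review_item_id", "reviewItemId"),
--     ("schedule_id", "scheduleId"),
-- )
--
-- def _lookup_created_id(created_ids: dict[str, Any] | None, key: str) -> Any | None:
--     if not created_ids:
--         return None
--     if key in created_ids:
--         return created_ids[key]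
--     for snake, camel in _ID_ALIASES:
--         if key == snake and camel in created_ids:
--             return created_ids[camel]
--         if key == camel and snake in created_ids:
--             return created_ids[snake]
--     return None
-- ===== SOURCE B (Python) =====
-- _BASES = ("course_id", "goal_id", "topic_id", "note_id", "review_item_id", "schedule_id")
--
--
-- def _camel_of(s):
--     # snake_case -> camelCase
--     out, up = [], False
--     for c in s:
--         if c == "_":
--             up = True
--         elif up:
--             out.append(c.upper())
--             up = False
--         else:
--             out.append(c)
--     return "".join(out)
--
--
-- def _snake_of(s):
--     # camelCase -> snake_case
--     out = []
--     for c in s: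
--         if c.isupper():
--             out.append("_")
--             out.append(c.lower())
--         else:
--             out.append(c)
--     return "".join(out)
--
--
-- def _lookup_created_id(created_ids, key):
--     if not created_ids:
--         return None
--     if key in created_ids:
--         return created_ids[key]
--     if "_" in key:
--         if key in _BASES and _camel_of(key) in created_ids:
--             return created_ids[_camel_of(key)]
--     else:
--         snake = _snake_of(key)
--         if snake in _BASES and _camel_of(snake) == key and snake in created_ids:
--             return created_ids[snake]
--     return None
-- ===== Notes on version B (the rewrite author's own statement) =====
-- stated objective: alternative
-- what changed: Instead of scanning A's table of (snake, camel) alias pairs, B computes the counterpart name algorithmically by snake_case/camelCase case conversion (with a roundtrip validation) and checks membership in a set of six base names.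
import Mathlib
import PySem

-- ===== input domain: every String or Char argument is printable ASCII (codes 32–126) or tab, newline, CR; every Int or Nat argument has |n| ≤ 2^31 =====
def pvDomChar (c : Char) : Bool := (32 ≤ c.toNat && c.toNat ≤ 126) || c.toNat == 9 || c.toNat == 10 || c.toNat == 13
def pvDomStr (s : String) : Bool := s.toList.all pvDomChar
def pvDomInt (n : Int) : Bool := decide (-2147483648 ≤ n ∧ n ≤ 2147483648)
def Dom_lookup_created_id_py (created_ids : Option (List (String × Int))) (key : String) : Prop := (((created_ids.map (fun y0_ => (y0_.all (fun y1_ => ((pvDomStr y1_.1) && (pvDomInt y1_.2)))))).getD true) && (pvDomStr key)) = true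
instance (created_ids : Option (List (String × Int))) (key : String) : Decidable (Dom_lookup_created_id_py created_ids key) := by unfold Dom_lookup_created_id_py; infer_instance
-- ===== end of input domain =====

-- B derives the alias counterpart by snake/camel case conversion against a set of base names instead of scanning A's table of (snake, camel) pairs (alternative decomposition; same behaviour).


-- ===== PORT A =====
def pvAliases : List (String × String) :=
  [("course_id", "courseId"), ("goal_id", "goalId"), ("topic_id", "topicId"),
   ("note_id", "noteId"), ("review_item_id", "reviewItemId"), ("schedule_id", "scheduleId")]

-- the `for snake, camel in _ID_ALIASES` loop of A
def pvLoopA (d : PySem.Dict String Int) (key : String) : List (String × String) → Option Int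
  | [] => none
  | (snake, camel) :: rest =>
    if key = snake ∧ d.contains camel then d.get? camel
    else if key = camel ∧ d.contains snake then d.get? snake
    else pvLoopA d key rest

def lookup_created_id_py (created_ids : Option (List (String × Int))) (key : String) : Option Int :=
  match created_ids with
  | none => none
  | some l =>
    if l = [] then none
    else
      let d := PySem.Dict.mk l
      if d.contains key then d.get? key
      else pvLoopA d key pvAliases

-- ===== PORT B =====
def pvBases : List String :=
  ["course_id", "goal_id", "topic_id", "note_id", "review_item_id", "schedule_id"]

-- _camel_of: the `for c in s` loop with its `up` flag (Char.toUpper is exact on the ASCII domain)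
def pvCamelOf (up : Bool) : List Char → List Char
  | [] => []
  | c :: rest =>
    if c = '_' then pvCamelOf true rest
    else if up then c.toUpper :: pvCamelOf false rest
    else c :: pvCamelOf false rest

-- _snake_of: the `for c in s` loop (Char.isUpper/toLower are exact on the ASCII domain)
def pvSnakeOf : List Char → List Char
  | [] => []
  | c :: rest =>
    if c.isUpper then '_' :: c.toLower :: pvSnakeOf rest
    else c :: pvSnakeOf rest

def lookup_created_id_py_alt (created_ids : Option (List (String × Int))) (key : String) : Option Int :=
  match created_ids with
  | none => none
  | some l =>
    if l = [] then none
    else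
      let d := PySem.Dict.mk l
      match d.get? key with
      | some v => some v
      | none =>
        if key.toList.contains '_' then
          if pvBases.contains key ∧ d.contains (String.ofList (pvCamelOf false key.toList)) then
            d.get? (String.ofList (pvCamelOf false key.toList))
          else none
        else
          let snake := String.ofList (pvSnakeOf key.toList)
          if pvBases.contains snake ∧ String.ofList (pvCamelOf false snake.toList) = key ∧ d.contains snake then
            d.get? snake
          else none

-- ===== PRECONDITION & SPEC =====
def Spec_lookup_created_id_py (created_ids : Option (List (String × Int))) (key : String) (out : Option Int) : Prop := out = lookup_created_id_py_alt created_ids key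
instance (created_ids : Option (List (String × Int))) (key : String) (out : Option Int) : Decidable (Spec_lookup_created_id_py created_ids key out) := by unfold Spec_lookup_created_id_py; infer_instance

-- ===== CLAIM (what is proved, stated in full; the proofs are below) =====
def Claim_equal_lookup_created_id_py : Prop := ∀ (created_ids : Option (List (String × Int))) (key : String), Dom_lookup_created_id_py created_ids key → Spec_lookup_created_id_py created_ids key (lookup_created_id_py created_ids key)

-- ===== LEMMAS AND PROOFS =====
lemma pv_main (l : List (String × Int)) (key : String) (hne : ¬ l = []) :
    lookup_created_id_py (some l) key = lookup_created_id_py_alt (some l) key := by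
  simp only [lookup_created_id_py, lookup_created_id_py_alt, if_neg hne]
  rcases hget : (PySem.Dict.mk l).get? key with _ | v
  · have hc : (PySem.Dict.mk l).contains key = false := by
      rw [PySem.Dict.contains_eq_isSome_get?, hget]; rfl
    rw [if_neg (by simp [hc])]
    show pvLoopA (PySem.Dict.mk l) key pvAliases = _
    by_cases h1 : key = "course_id"
    · subst h1
      have e1 : ("course_id".toList.contains '_') = true := by decide
      have e2 : pvBases.contains "course_id" = true := by decide
      have e3 : String.ofList (pvCamelOf false ("course_id".toList)) = "courseId" := by decide
      simp only [e1, e2, e3, if_true, true_and, pvLoopA, pvAliases]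
      by_cases hcc : (PySem.Dict.mk l).contains "courseId" = true
      · simp [hcc]
      · simp [hcc]
    by_cases h2 : key = "courseId"
    · subst h2
      have e1 : ("courseId".toList.contains '_') = false := by decide
      have e4 : String.ofList (pvSnakeOf ("courseId".toList)) = "course_id" := by decide
      have e2 : pvBases.contains "course_id" = true := by decide
      have e3 : String.ofList (pvCamelOf false ("course_id".toList)) = "courseId" := by decide
      simp only [e1, e4, e2, e3, Bool.false_eq_true, if_false, pvLoopA, pvAliases]
      by_cases hcc : (PySem.Dict.mk l).contains "course_id" = true
      · simp [hcc]
      · simp [hcc]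
    by_cases h3 : key = "goal_id"
    · subst h3
      have e1 : ("goal_id".toList.contains '_') = true := by decide
      have e2 : pvBases.contains "goal_id" = true := by decide
      have e3 : String.ofList (pvCamelOf false ("goal_id".toList)) = "goalId" := by decide
      simp only [e1, e2, e3, if_true, true_and, pvLoopA, pvAliases]
      by_cases hcc : (PySem.Dict.mk l).contains "goalId" = true
      · simp [hcc]
      · simp [hcc]
    by_cases h4 : key = "goalId"
    · subst h4
      have e1 : ("goalId".toList.contains '_') = false := by decide
      have e4 : String.ofList (pvSnakeOf ("goalId".toList)) = "goal_id" := by decide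
      have e2 : pvBases.contains "goal_id" = true := by decide
      have e3 : String.ofList (pvCamelOf false ("goal_id".toList)) = "goalId" := by decide
      simp only [e1, e4, e2, e3, Bool.false_eq_true, if_false, pvLoopA, pvAliases]
      by_cases hcc : (PySem.Dict.mk l).contains "goal_id" = true
      · simp [hcc]
      · simp [hcc]
    by_cases h5 : key = "topic_id"
    · subst h5
      have e1 : ("topic_id".toList.contains '_') = true := by decide
      have e2 : pvBases.contains "topic_id" = true := by decide
      have e3 : String.ofList (pvCamelOf false ("topic_id".toList)) = "topicId" := by decide
      simp only [e1, e2, e3, if_true, true_and, pvLoopA, pvAliases]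
      by_cases hcc : (PySem.Dict.mk l).contains "topicId" = true
      · simp [hcc]
      · simp [hcc]
    by_cases h6 : key = "topicId"
    · subst h6
      have e1 : ("topicId".toList.contains '_') = false := by decide
      have e4 : String.ofList (pvSnakeOf ("topicId".toList)) = "topic_id" := by decide
      have e2 : pvBases.contains "topic_id" = true := by decide
      have e3 : String.ofList (pvCamelOf false ("topic_id".toList)) = "topicId" := by decide
      simp only [e1, e4, e2, e3, Bool.false_eq_true, if_false, pvLoopA, pvAliases]
      by_cases hcc : (PySem.Dict.mk l).contains "topic_id" = true
      · simp [hcc]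
      · simp [hcc]
    by_cases h7 : key = "note_id"
    · subst h7
      have e1 : ("note_id".toList.contains '_') = true := by decide
      have e2 : pvBases.contains "note_id" = true := by decide
      have e3 : String.ofList (pvCamelOf false ("note_id".toList)) = "noteId" := by decide
      simp only [e1, e2, e3, if_true, true_and, pvLoopA, pvAliases]
      by_cases hcc : (PySem.Dict.mk l).contains "noteId" = true
      · simp [hcc]
      · simp [hcc]
    by_cases h8 : key = "noteId"
    · subst h8
      have e1 : ("noteId".toList.contains '_') = false := by decide
      have e4 : String.ofList (pvSnakeOf ("noteId".toList)) = "note_id" := by decide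
      have e2 : pvBases.contains "note_id" = true := by decide
      have e3 : String.ofList (pvCamelOf false ("note_id".toList)) = "noteId" := by decide
      simp only [e1, e4, e2, e3, Bool.false_eq_true, if_false, pvLoopA, pvAliases]
      by_cases hcc : (PySem.Dict.mk l).contains "note_id" = true
      · simp [hcc]
      · simp [hcc]
    by_cases h9 : key = "review_item_id"
    · subst h9
      have e1 : ("review_item_id".toList.contains '_') = true := by decide
      have e2 : pvBases.contains "review_item_id" = true := by decide
      have e3 : String.ofList (pvCamelOf false ("review_item_id".toList)) = "reviewItemId" := by decide
      simp only [e1, e2, e3, if_true, true_and, pvLoopA, pvAliases]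
      by_cases hcc : (PySem.Dict.mk l).contains "reviewItemId" = true
      · simp [hcc]
      · simp [hcc]
    by_cases h10 : key = "reviewItemId"
    · subst h10
      have e1 : ("reviewItemId".toList.contains '_') = false := by decide
      have e4 : String.ofList (pvSnakeOf ("reviewItemId".toList)) = "review_item_id" := by decide
      have e2 : pvBases.contains "review_item_id" = true := by decide
      have e3 : String.ofList (pvCamelOf false ("review_item_id".toList)) = "reviewItemId" := by decide
      simp only [e1, e4, e2, e3, Bool.false_eq_true, if_false, pvLoopA, pvAliases]
      by_cases hcc : (PySem.Dict.mk l).contains "review_item_id" = true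
      · simp [hcc]
      · simp [hcc]
    by_cases h11 : key = "schedule_id"
    · subst h11
      have e1 : ("schedule_id".toList.contains '_') = true := by decide
      have e2 : pvBases.contains "schedule_id" = true := by decide
      have e3 : String.ofList (pvCamelOf false ("schedule_id".toList)) = "scheduleId" := by decide
      simp only [e1, e2, e3, if_true, true_and, pvLoopA, pvAliases]
      by_cases hcc : (PySem.Dict.mk l).contains "scheduleId" = true
      · simp [hcc]
      · simp [hcc]
    by_cases h12 : key = "scheduleId"
    · subst h12
      have e1 : ("scheduleId".toList.contains '_') = false := by decide
      have e4 : String.ofList (pvSnakeOf ("scheduleId".toList)) = "schedule_id" := by decide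
      have e2 : pvBases.contains "schedule_id" = true := by decide
      have e3 : String.ofList (pvCamelOf false ("schedule_id".toList)) = "scheduleId" := by decide
      simp only [e1, e4, e2, e3, Bool.false_eq_true, if_false, pvLoopA, pvAliases]
      by_cases hcc : (PySem.Dict.mk l).contains "schedule_id" = true
      · simp [hcc]
      · simp [hcc]
    · have hbk : pvBases.contains key = false := by
        simp [pvBases, h1, h3, h5, h7, h9, h11]
      have hA : pvLoopA (PySem.Dict.mk l) key pvAliases = none := by
        simp [pvLoopA, pvAliases, h1, h2, h3, h4, h5, h6, h7, h8, h9, h10, h11, h12]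
      rw [hA]
      by_cases hu : key.toList.contains '_' = true
      · simp only [hu, if_true, hbk, Bool.false_eq_true, false_and, if_false]
      · simp only [Bool.not_eq_true] at hu
        simp only [hu, Bool.false_eq_true, if_false]
        rcases hb : pvBases.contains (String.ofList (pvSnakeOf key.toList)) with _ | _
        · simp
        · have hmem : String.ofList (pvSnakeOf key.toList) = "course_id" ∨ String.ofList (pvSnakeOf key.toList) = "goal_id" ∨ String.ofList (pvSnakeOf key.toList) = "topic_id" ∨ String.ofList (pvSnakeOf key.toList) = "note_id" ∨ String.ofList (pvSnakeOf key.toList) = "review_item_id" ∨ String.ofList (pvSnakeOf key.toList) = "schedule_id" := by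
            simpa [pvBases] using hb
          have c1 : String.ofList (pvCamelOf false ['c', 'o', 'u', 'r', 's', 'e', '_', 'i', 'd']) = "courseId" := by decide
          have n1 : ¬ ("courseId" : String) = key := fun h => h2 h.symm
          have c2 : String.ofList (pvCamelOf false ['g', 'o', 'a', 'l', '_', 'i', 'd']) = "goalId" := by decide
          have n2 : ¬ ("goalId" : String) = key := fun h => h4 h.symm
          have c3 : String.ofList (pvCamelOf false ['t', 'o', 'p', 'i', 'c', '_', 'i', 'd']) = "topicId" := by decide
          have n3 : ¬ ("topicId" : String) = key := fun h => h6 h.symm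
          have c4 : String.ofList (pvCamelOf false ['n', 'o', 't', 'e', '_', 'i', 'd']) = "noteId" := by decide
          have n4 : ¬ ("noteId" : String) = key := fun h => h8 h.symm
          have c5 : String.ofList (pvCamelOf false ['r', 'e', 'v', 'i', 'e', 'w', '_', 'i', 't', 'e', 'm', '_', 'i', 'd']) = "reviewItemId" := by decide
          have n5 : ¬ ("reviewItemId" : String) = key := fun h => h10 h.symm
          have c6 : String.ofList (pvCamelOf false ['s', 'c', 'h', 'e', 'd', 'u', 'l', 'e', '_', 'i', 'd']) = "scheduleId" := by decide
          have n6 : ¬ ("scheduleId" : String) = key := fun h => h12 h.symm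
          rcases hmem with e | e | e | e | e | e <;> rw [e] <;>
            simp [c1, c2, c3, c4, c5, c6, n1, n2, n3, n4, n5, n6]
  · have hc : (PySem.Dict.mk l).contains key = true := by
      rw [PySem.Dict.contains_eq_isSome_get?, hget]; rfl
    rw [if_pos hc]

-- ===== VERDICT (by name: the statement is the Claim_ definition above) =====
theorem lookup_created_id_py_spec : Claim_equal_lookup_created_id_py := by
  intro ci key _
  unfold Spec_lookup_created_id_py
  match ci with
  | none => rfl
  | some l =>
    by_cases h : l = []
    · subst h; rfl
    · exact pv_main l key h
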